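-- pv_equiv track=rewrite | github.com/maringomori/advent-of-code-2023 | day05/part1.py | find_string_location_and_text_before_empty_line
-- ===== SOURCE A (Python) =====
-- def find_string_location_and_text_before_empty_line(input, string):
--     output = []
--     for i, line in enumerate(input):
--         if string in line:
--             for j, line2 in enumerate(input[i+1:]):
--                 if line2.strip() == "":
--                     return output
--                 output.append(input[i+j+1].strip())
-- ===== SOURCE B (Python) =====
-- def find_string_location_and_text_before_empty_line(input, string):
--     found = False
--     output = []
--     for line in input:
--         if found:
--             if line.strip() == "":
--                 return output
--             output.append(line.strip())
--         elif string in line: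
--             found = True
-- ===== Notes on version B (the rewrite author's own statement) =====
-- stated objective: simpler
-- what changed: Replaced the nested enumerate-and-slice scan (which re-indexes input[i+j+1] and restarts a collection loop at every matching line) by one flat pass over the lines with a boolean 'found' flag and a single accumulator.
import Mathlib
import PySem

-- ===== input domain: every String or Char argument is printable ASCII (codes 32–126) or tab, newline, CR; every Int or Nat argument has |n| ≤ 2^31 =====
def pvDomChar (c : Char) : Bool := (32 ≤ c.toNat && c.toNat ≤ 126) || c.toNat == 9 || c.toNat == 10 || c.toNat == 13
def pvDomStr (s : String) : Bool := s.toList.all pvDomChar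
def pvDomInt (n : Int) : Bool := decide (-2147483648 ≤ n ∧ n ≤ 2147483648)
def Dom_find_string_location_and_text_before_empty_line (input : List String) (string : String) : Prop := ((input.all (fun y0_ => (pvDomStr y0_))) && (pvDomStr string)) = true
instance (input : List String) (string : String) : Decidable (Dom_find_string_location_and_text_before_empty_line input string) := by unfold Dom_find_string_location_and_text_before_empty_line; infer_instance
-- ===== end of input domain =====

-- B replaces A's nested find-then-collect loops (with their input[i+j+1] re-indexing) by one flat
-- stateful pass with a 'found' flag; objective: simpler. Return values only (neither mutates input).

-- ===== PORT A =====
-- inner loop: 'for j, line2 in enumerate(input[i+1:])'; returns .inl output on 'return output',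
-- .inr output when the loop exhausts (the outer loop then continues)
def pvAInner (input : List String) (i : Int) : List String → Int → List String →
    (List String ⊕ List String)
  | [], _, output => Sum.inr output
  | line2 :: rest, j, output =>
    if PySem.Str.strip line2 == "" then Sum.inl output
    else pvAInner input i rest (j + 1)
      (output ++ [PySem.Str.strip ((PySem.List.pyGet? input (i + j + 1)).getD "")])
      -- input[i+j+1] is always in range here (j indexes input[i+1:]), so getD "" is never taken

-- outer loop: 'for i, line in enumerate(input)'
def pvAOuter (input : List String) (string : String) : List String → Int → List String →
    Option (List String)
  | [], _, _ => none
  | line :: ls, i, output =>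
    if PySem.Str.isIn string line then
      match pvAInner input i (PySem.List.slice input (some (i + 1)) none) 0 output with
      | Sum.inl out => some out
      | Sum.inr out => pvAOuter input string ls (i + 1) out
    else pvAOuter input string ls (i + 1) output

def find_string_location_and_text_before_empty_line (input : List String) (string : String) :
    Option (List String) :=
  pvAOuter input string input 0 []

-- ===== PORT B =====
def pvBLoop (string : String) : Bool → List String → List String → Option (List String)
  | _, _, [] => none
  | found, output, line :: ls =>
    if found then
      if PySem.Str.strip line == "" then some output
      else pvBLoop string true (output ++ [PySem.Str.strip line]) ls
    else if PySem.Str.isIn string line then pvBLoop string true output ls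
    else pvBLoop string false output ls

def find_string_location_and_text_before_empty_line_alt (input : List String) (string : String) :
    Option (List String) :=
  pvBLoop string false [] input

-- ===== PRECONDITION & SPEC =====
def Spec_find_string_location_and_text_before_empty_line (input : List String) (string : String) (out : Option (List String)) : Prop := out = find_string_location_and_text_before_empty_line_alt input string
instance (input : List String) (string : String) (out : Option (List String)) : Decidable (Spec_find_string_location_and_text_before_empty_line input string out) := by unfold Spec_find_string_location_and_text_before_empty_line; infer_instance

-- ===== CLAIM (what is proved, stated in full; the proofs are below) =====
def Claim_equal_find_string_location_and_text_before_empty_line : Prop := ∀ (input : List String) (string : String), Dom_find_string_location_and_text_before_empty_line input string → Spec_find_string_location_and_text_before_empty_line input string (find_string_location_and_text_before_empty_line input string)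

-- ===== LEMMAS AND PROOFS =====

-- a pure version of A's inner loop, indices resolved away
def pvPureInner : List String → List String → (List String ⊕ List String)
  | [], output => Sum.inr output
  | line2 :: rest, output =>
    if PySem.Str.strip line2 == "" then Sum.inl output
    else pvPureInner rest (output ++ [PySem.Str.strip line2])

theorem pvAInner_eq_pure (input : List String) (i : Int) :
    ∀ (l : List String) (j : Int) (out : List String), 0 ≤ i + 1 + j →
      l = input.drop (i + 1 + j).toNat →
      pvAInner input i l j out = pvPureInner l out := by
  intro l
  induction l with
  | nil => intro j out _ _; rfl
  | cons x rest ih =>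
    intro j out hnn hl
    simp only [pvAInner, pvPureInner]
    split
    · rfl
    · have hx : PySem.List.pyGet? input (i + j + 1) = some x := by
        have h1 : (i + 1 + j).toNat < input.length := by
          by_contra h
          rw [List.drop_eq_nil_of_le (by omega)] at hl
          exact List.cons_ne_nil _ _ hl
        have h2 : input[(i + 1 + j).toNat] = x := by
          have := List.getElem_drop (xs := input) (i := (i + 1 + j).toNat) (j := 0)
            (h := by simpa using h1)
          simpa [← hl] using this.symm
        have : i + j + 1 = ((i + 1 + j).toNat : Int) := by omega
        rw [this, PySem.List.pyGet?_natCast]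
        simp [List.getElem?_eq_getElem h1, h2]
      rw [hx]
      simp only [Option.getD_some]
      apply ih (j + 1) _ (by omega)
      have : (i + 1 + (j + 1)).toNat = (i + 1 + j).toNat + 1 := by omega
      rw [this]
      rw [← List.drop_drop]
      rw [← hl]
      rfl

theorem pvBLoop_true_eq (string : String) :
    ∀ (l : List String) (out : List String),
      pvBLoop string true out l =
        (match pvPureInner l out with
         | Sum.inl o => some o
         | Sum.inr _ => none) := by
  intro l
  induction l with
  | nil => intro out; rfl
  | cons x rest ih =>
    intro out
    by_cases hx : PySem.Str.strip x == ""
    · simp [pvBLoop, pvPureInner, hx]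
    · simp [pvBLoop, pvPureInner, hx, ih]

theorem pvPureInner_inr (l : List String) :
    ∀ (out o : List String), pvPureInner l out = Sum.inr o →
      ∀ x ∈ l, ¬ (PySem.Str.strip x == "") := by
  induction l with
  | nil => simp
  | cons y rest ih =>
    intro out o h x hx
    simp only [pvPureInner] at h
    by_cases hy : PySem.Str.strip y == ""
    · simp [hy] at h
    · rw [if_neg hy] at h
      rcases List.mem_cons.mp hx with rfl | hx'
      · exact fun hc => hy hc
      · exact ih _ _ h x hx'

theorem pvPureInner_all_nonempty (l : List String) :
    ∀ (out : List String), (∀ x ∈ l, ¬ (PySem.Str.strip x == "")) →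
      ∃ o, pvPureInner l out = Sum.inr o := by
  induction l with
  | nil => intro out _; exact ⟨out, rfl⟩
  | cons y rest ih =>
    intro out h
    simp only [pvPureInner]
    rw [if_neg (h y (List.mem_cons_self ..))]
    exact ih _ (fun x hx => h x (List.mem_cons_of_mem _ hx))

-- after the first match, if no remaining line strips to "", A's outer loop returns none
theorem pvAOuter_none (input : List String) (string : String) :
    ∀ (l : List String) (i : Int) (out : List String), 0 ≤ i →
      l = input.drop i.toNat →
      (∀ x ∈ l, ¬ (PySem.Str.strip x == "")) →
      pvAOuter input string l i out = none := by
  intro l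
  induction l with
  | nil => intro i out _ _ _; rfl
  | cons x rest ih =>
    intro i out hi hl hne
    have hrest : rest = input.drop (i + 1).toNat := by
      have : (i + 1).toNat = i.toNat + 1 := by omega
      rw [this, ← List.drop_drop, ← hl]; rfl
    have hslice : PySem.List.slice input (some (i + 1)) none = rest := by
      rw [PySem.List.slice_from input (by omega : (0:Int) ≤ i + 1)]; exact hrest.symm
    simp only [pvAOuter]
    have hrec : pvAOuter input string rest (i + 1) = fun out => none := by
      funext o
      exact ih (i + 1) o (by omega) hrest (fun x hx => hne x (List.mem_cons_of_mem _ hx))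
    split
    · rw [hslice,
        pvAInner_eq_pure input i rest 0 out (by omega)
          (by rw [hrest]; congr 1; omega)]
      obtain ⟨o, ho⟩ := pvPureInner_all_nonempty rest out
        (fun x hx => hne x (List.mem_cons_of_mem _ hx))
      rw [ho]
      exact congrFun hrec o
    · exact congrFun hrec out

theorem pv_main (input : List String) (string : String) :
    ∀ (l : List String) (i : Int), 0 ≤ i → l = input.drop i.toNat →
      pvAOuter input string l i [] = pvBLoop string false [] l := by
  intro l
  induction l with
  | nil => intro i _ _; rfl
  | cons x rest ih =>
    intro i hi hl
    have hrest : rest = input.drop (i + 1).toNat := by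
      have : (i + 1).toNat = i.toNat + 1 := by omega
      rw [this, ← List.drop_drop, ← hl]; rfl
    have hslice : PySem.List.slice input (some (i + 1)) none = rest := by
      rw [PySem.List.slice_from input (by omega : (0:Int) ≤ i + 1)]; exact hrest.symm
    by_cases hin : PySem.Str.isIn string x
    · -- string found in x
      simp only [pvAOuter, pvBLoop, hin, if_pos, Bool.false_eq_true, if_false]
      rw [hslice,
        pvAInner_eq_pure input i rest 0 [] (by omega)
          (by rw [hrest]; congr 1; omega)]
      rw [pvBLoop_true_eq]
      cases h : pvPureInner rest [] with
      | inl o => rfl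
      | inr o =>
        simp only []
        exact pvAOuter_none input string rest (i + 1) o (by omega) hrest
          (pvPureInner_inr rest [] o h)
    · simp only [pvAOuter, pvBLoop, hin, Bool.false_eq_true, if_false]
      exact ih (i + 1) (by omega) hrest

-- ===== VERDICT (by name: the statement is the Claim_ definition above) =====
theorem find_string_location_and_text_before_empty_line_spec : Claim_equal_find_string_location_and_text_before_empty_line := by
  intro input string _
  unfold Spec_find_string_location_and_text_before_empty_line
    find_string_location_and_text_before_empty_line
    find_string_location_and_text_before_empty_line_alt
  exact pv_main input string input 0 le_rfl rfl
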